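-- pv_equiv track=rewrite | github.com/camargodev/advent-of-code-2023 | day-14/src/part_2/rolling_stones.py | shift_to_south
-- ===== SOURCE A (Python) =====
-- CUBE_STONE = "#"
--
-- SPACE = "."
--
-- def shift_to_south(stones):
--     shifted_stones = stones
--     for stone_col_idx in range(len(stones[0])):
--         str_stone_col = "".join([stones[row_idx][stone_col_idx] for row_idx in range(len(stones))])
--         shifted_parts = []
--         for part in str_stone_col.split(CUBE_STONE):
--             grouped_stones = part.replace(SPACE, "")
--             empty_size = len(part) - len(grouped_stones)
--             shifted_parts.append((SPACE * empty_size) + grouped_stones)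
--         str_shifted_col = CUBE_STONE.join(shifted_parts)
--         for row_idx in range(len(stones)):
--             shifted_stones[row_idx][stone_col_idx] = str_shifted_col[row_idx]
--
--     return shifted_stones
-- ===== SOURCE B (Python) =====
-- CUBE_STONE = "#"
--
-- SPACE = "."
--
-- def _fall(text):
--     res = []
--     seg = []
--     dots = 0
--     for ch in text:
--         if ch == CUBE_STONE:
--             res.append(SPACE * dots)
--             res.extend(seg)
--             res.append(CUBE_STONE)
--             seg = []
--             dots = 0
--         elif ch == SPACE:
--             dots += 1
--         else:
--             seg.append(ch)
--     res.append(SPACE * dots)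
--     res.extend(seg)
--     return "".join(res)
--
-- def shift_to_south(stones):
--     new_cols = [_fall("".join(row[c] for row in stones))
--                 for c in range(len(stones[0]))]
--     for r in range(len(stones)):
--         row = stones[r]
--         for c in range(len(new_cols)):
--             row[c] = new_cols[c][r]
--     return stones
-- ===== Notes on version B (the rewrite author's own statement) =====
-- stated objective: alternative
-- what changed: A rewrites each column in place via a split('#')/replace('.','')/pad/join('#') string pipeline followed by a per-column write-back loop; B first computes all settled columns with a single forward scan per column that keeps two accumulators (a pending-dot counter and the current segment's movable stones, flushed at each '#' and at the end), and then writes the grid back row by row in one nested pass.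
import Mathlib
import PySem

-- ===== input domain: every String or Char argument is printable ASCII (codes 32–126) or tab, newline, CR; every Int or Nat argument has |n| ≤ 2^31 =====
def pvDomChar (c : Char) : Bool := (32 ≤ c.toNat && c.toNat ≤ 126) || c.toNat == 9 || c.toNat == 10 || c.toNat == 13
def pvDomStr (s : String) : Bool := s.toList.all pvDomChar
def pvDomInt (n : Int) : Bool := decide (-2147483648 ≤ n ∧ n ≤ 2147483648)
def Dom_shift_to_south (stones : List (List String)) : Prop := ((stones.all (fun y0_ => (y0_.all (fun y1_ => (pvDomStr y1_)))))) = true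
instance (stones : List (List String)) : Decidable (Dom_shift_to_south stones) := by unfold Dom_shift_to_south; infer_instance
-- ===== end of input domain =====

-- B drops A's in-place per-column split('#')/replace('.','')/pad/join('#') pipeline: it first
-- computes every settled column with ONE forward scan keeping a pending-dot counter and the
-- current segment's movable stones (flushed at each '#' and at the end), then writes the grid
-- back row by row (objective: alternative decomposition, similar cost). Both Pythons mutate
-- `stones` in place and return the same object; the equivalence proved is about the return value.

-- ===== PORT A =====
-- transliteration of A: per column, join the column into a string, split on '#',
-- compress each part (dots first, stones after), rejoin, write back row by row.
def shift_to_south (stones : List (List String)) : List (List String) :=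
  -- range(len(stones[0])): stones[0] raises IndexError on []; there w = 0 and the result is `stones`, never compared (Python raised)
  let w := ((PySem.List.pyGet? stones 0).getD []).length
  (List.range w).foldl (fun g c =>
    -- "".join([stones[row_idx][stone_col_idx] for row_idx in range(len(stones))])
    -- (stones[row_idx][stone_col_idx] raises on a too-short row; the getD default makes the
    --  port total — on such inputs Python A raised and the result is never compared)
    let strCol : List Char :=
      PySem.Chars.join [] ((List.range g.length).map (fun r => ((g.getD r []).getD c "").toList))
    -- for part in str_stone_col.split(CUBE_STONE): … shifted_parts.append(…)
    let shiftedParts : List (List Char) :=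
      (PySem.Chars.splitOn strCol ['#']).foldl (fun acc part =>
        let grouped := PySem.Chars.replace part ['.'] []
        let emptySize := part.length - grouped.length
        acc ++ [List.replicate emptySize '.' ++ grouped]) []
    -- str_shifted_col = CUBE_STONE.join(shifted_parts)
    let strShifted : List Char := PySem.Chars.join ['#'] shiftedParts
    -- for row_idx in range(len(stones)): shifted_stones[row_idx][stone_col_idx] = str_shifted_col[row_idx]
    -- (str_shifted_col[row_idx] raises when the column text is shorter than the grid; the total
    --  default ' ' is reached only where Python A raised)
    (List.range g.length).foldl (fun g2 r =>
      g2.modify r (fun row => row.set c (String.ofList [strShifted.getD r ' ']))) g) stones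

-- ===== PORT B =====
-- B's helper _fall: one forward scan over the column text; state = (res = settled output,
-- seg = movable stones of the current segment, dots = pending '.' count); a '#' flushes
-- dots-then-seg-then-'#'; the end flushes dots-then-seg.
def pvFallStep (st : List Char × List Char × Nat) (ch : Char) : List Char × List Char × Nat :=
  if ch = '#' then (st.1 ++ List.replicate st.2.2 '.' ++ st.2.1 ++ ['#'], [], 0)
  else if ch = '.' then (st.1, st.2.1, st.2.2 + 1)
  else (st.1, st.2.1 ++ [ch], st.2.2)

def pvFall (text : List Char) : List Char :=
  let st := text.foldl pvFallStep ([], [], 0)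
  st.1 ++ List.replicate st.2.2 '.' ++ st.2.1

-- transliteration of B: build every settled column first (reading the untouched grid), then
-- write the grid back row by row; row[c] = new_cols[c][r] (out-of-range reads/writes only
-- where Python raised; Lean's set is a no-op there, getD defaults to ' ')
def shift_to_south_alt (stones : List (List String)) : List (List String) :=
  let newCols : List (List Char) :=
    (List.range ((PySem.List.pyGet? stones 0).getD []).length).map (fun c =>
      pvFall (stones.foldl (fun acc row => acc ++ (row.getD c "").toList) []))
  (List.range stones.length).foldl (fun g r =>
    g.modify r (fun row =>
      (List.range newCols.length).foldl (fun row2 c =>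
        row2.set c (String.ofList [(newCols.getD c []).getD r ' '])) row)) stones

-- ===== PRECONDITION & SPEC =====
-- Pre_ excludes exactly the inputs on which Python A raises IndexError: the empty grid
-- (stones[0]), a row with fewer cells than row 0 (the column read), or a column whose joined
-- text is shorter than the number of rows (the write-back str_shifted_col[row_idx]).
-- On every input admitted by Pre_ both Pythons return; the ports in fact agree on all inputs.
def Pre_shift_to_south (stones : List (List String)) : Prop :=
  stones ≠ [] ∧
  (∀ row ∈ stones, (stones.headD []).length ≤ row.length) ∧
  ∀ c, c < (stones.headD []).length →
    stones.length ≤ (stones.map (fun row => (row.getD c "").length)).sum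
instance (stones : List (List String)) : Decidable (Pre_shift_to_south stones) := by
  unfold Pre_shift_to_south; infer_instance

def pvWitness_shift_to_south : List (List String) := [["O", "."], [".", "#"], ["O", "O"]]

def Spec_shift_to_south (stones : List (List String)) (out : List (List String)) : Prop := out = shift_to_south_alt stones
instance (stones : List (List String)) (out : List (List String)) : Decidable (Spec_shift_to_south stones out) := by unfold Spec_shift_to_south; infer_instance

-- ===== CLAIM (what is proved, stated in full; the proofs are below) =====
def Claim_equal_shift_to_south : Prop := ∀ (stones : List (List String)), Dom_shift_to_south stones → Pre_shift_to_south stones → Spec_shift_to_south stones (shift_to_south stones)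

-- ===== LEMMAS AND PROOFS =====

-- A's column step, named (definitionally the body of A's outer fold)
def pvStepA (g : List (List String)) (c : Nat) : List (List String) :=
  let strCol : List Char :=
    PySem.Chars.join [] ((List.range g.length).map (fun r => ((g.getD r []).getD c "").toList))
  let shiftedParts : List (List Char) :=
    (PySem.Chars.splitOn strCol ['#']).foldl (fun acc part =>
      let grouped := PySem.Chars.replace part ['.'] []
      let emptySize := part.length - grouped.length
      acc ++ [List.replicate emptySize '.' ++ grouped]) []
  let strShifted : List Char := PySem.Chars.join ['#'] shiftedParts
  (List.range g.length).foldl (fun g2 r =>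
    g2.modify r (fun row => row.set c (String.ofList [strShifted.getD r ' ']))) g

-- A's column-text read and its split/compress/join pipeline, named
def pvColText (g : List (List String)) (c : Nat) : List Char :=
  PySem.Chars.join [] ((List.range g.length).map (fun r => ((g.getD r []).getD c "").toList))

def pvApipe (s : List Char) : List Char :=
  PySem.Chars.join ['#'] ((PySem.Chars.splitOn s ['#']).foldl (fun acc part =>
    acc ++ [List.replicate (part.length - (PySem.Chars.replace part ['.'] []).length) '.' ++
      PySem.Chars.replace part ['.'] []]) [])

-- structural version of str.split('#')
def pvSplit1 : List Char → List (List Char)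
  | [] => [[]]
  | c :: t =>
    if c = '#' then [] :: pvSplit1 t
    else match pvSplit1 t with
      | p :: ps => (c :: p) :: ps
      | [] => [[c]]

-- A's per-part compression
def pvG (p : List Char) : List Char :=
  List.replicate (p.length - (p.filter (fun c => !(c == '.'))).length) '.' ++
    p.filter (fun c => !(c == '.'))

-- '#'.join of the compressed tail parts
def pvTail (ps : List (List Char)) : List Char := ps.flatMap (fun q => '#' :: pvG q)

theorem pvSplit1_ne_nil (l : List Char) : pvSplit1 l ≠ [] := by
  cases l with
  | nil => simp [pvSplit1]
  | cons c t =>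
    simp only [pvSplit1]
    split
    · simp
    · cases pvSplit1 t <;> simp

theorem pvSplitOn_go_eq (fuel : Nat) : ∀ (l cur : List Char) (acc : List (List Char)), l.length ≤ fuel →
    PySem.Chars.splitOn.go ['#'] fuel l cur acc =
      acc.reverse ++ List.modifyHead (fun p => cur.reverse ++ p) (pvSplit1 l) := by
  induction fuel with
  | zero =>
    intro l cur acc h
    have : l = [] := by cases l <;> simp_all
    subst this
    simp [PySem.Chars.splitOn.go, pvSplit1]
  | succ fuel ih =>
    intro l cur acc h
    cases l with
    | nil => simp [PySem.Chars.splitOn.go, pvSplit1]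
    | cons c rest =>
      rw [PySem.Chars.splitOn.go]
      by_cases hc : c = '#'
      · subst hc
        rw [if_pos (by simp [List.isPrefixOf])]
        rw [ih _ _ _ (by simpa using Nat.le_of_succ_le_succ h)]
        have h1 : pvSplit1 ('#' :: rest) = [] :: pvSplit1 rest := by simp [pvSplit1]
        have h2 : ∀ (X : List (List Char)), List.modifyHead (fun p => List.reverse [] ++ p) X = X := by
          intro X; cases X <;> simp
        rw [h1, h2]
        simp
      · have hpre : (['#'].isPrefixOf (c :: rest)) = false := by
          simp [List.isPrefixOf]
          exact fun h' => hc h'.symm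
        rw [if_neg (by simp [hpre])]
        rw [ih _ _ _ (by simpa using Nat.le_of_succ_le_succ h)]
        rcases hX : pvSplit1 rest with _ | ⟨p, ps⟩
        · exact absurd hX (pvSplit1_ne_nil rest)
        · simp [pvSplit1, hc, hX]

theorem pvSplitOn_eq (l : List Char) : PySem.Chars.splitOn l ['#'] = pvSplit1 l := by
  rw [PySem.Chars.splitOn]
  rw [pvSplitOn_go_eq (l.length + 1) l [] [] (by omega)]
  cases hl : pvSplit1 l
  · simp_all
  · simp_all

theorem pvReplace_go_eq (fuel : Nat) : ∀ (l acc : List Char), l.length ≤ fuel →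
    PySem.Chars.replace.go ['.'] [] fuel l acc =
      acc.reverse ++ l.filter (fun c => !(c == '.')) := by
  induction fuel with
  | zero =>
    intro l acc h
    have : l = [] := by cases l <;> simp_all
    subst this
    simp [PySem.Chars.replace.go]
  | succ fuel ih =>
    intro l acc h
    cases l with
    | nil => simp [PySem.Chars.replace.go]
    | cons c rest =>
      rw [PySem.Chars.replace.go]
      by_cases hc : c = '.'
      · subst hc
        rw [if_pos (by simp [List.isPrefixOf])]
        rw [ih _ _ (by simpa using Nat.le_of_succ_le_succ h)]
        simp
      · have hpre : (['.'].isPrefixOf (c :: rest)) = false := by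
          simp [List.isPrefixOf]
          exact fun h' => hc h'.symm
        rw [if_neg (by simp [hpre])]
        rw [ih _ _ (by simpa using Nat.le_of_succ_le_succ h)]
        simp [hc]

theorem pvReplace_eq (l : List Char) :
    PySem.Chars.replace l ['.'] [] = l.filter (fun c => !(c == '.')) := by
  rw [PySem.Chars.replace]
  rw [if_neg (by simp)]
  rw [pvReplace_go_eq l.length l [] (le_refl _)]
  simp

theorem pvJoinG (p : List Char) (ps : List (List Char)) :
    PySem.Chars.join ['#'] ((p :: ps).map pvG) = pvG p ++ pvTail ps := by
  induction ps generalizing p with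
  | nil => simp [PySem.Chars.join_singleton, pvTail]
  | cons q r ih =>
    rw [List.map_cons, List.map_cons, PySem.Chars.join_cons_cons, ← List.map_cons]
    rw [ih q]
    simp [pvTail]

-- A's pipeline, in closed form over the split
theorem pvApipe_spec (s : List Char) (p : List Char) (ps : List (List Char))
    (h : pvSplit1 s = p :: ps) : pvApipe s = pvG p ++ pvTail ps := by
  unfold pvApipe
  rw [PySem.List.foldl_append_singleton_eq_map
    (fun part => List.replicate (part.length - (PySem.Chars.replace part ['.'] []).length) '.' ++
      PySem.Chars.replace part ['.'] [])]
  have hf : (fun part => List.replicate (part.length - (PySem.Chars.replace part ['.'] []).length) '.' ++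
      PySem.Chars.replace part ['.'] []) = pvG := by
    funext q
    rw [pvReplace_eq]
    rfl
  rw [hf, pvSplitOn_eq, h]
  simpa using pvJoinG p ps

-- invariant of B's forward scan: finishing from state (res, seg, dots) on cs whose first
-- '#'-segment is p yields res ++ dots'·'.' ++ seg ++ stones(p) ++ tail
theorem pvFall_inv (cs : List Char) : ∀ (res seg : List Char) (dots : Nat)
    (p : List Char) (ps : List (List Char)), pvSplit1 cs = p :: ps →
    (cs.foldl pvFallStep (res, seg, dots)).1 ++
      List.replicate (cs.foldl pvFallStep (res, seg, dots)).2.2 '.' ++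
      (cs.foldl pvFallStep (res, seg, dots)).2.1 =
    res ++ List.replicate (dots + (p.length - (p.filter (fun c => !(c == '.'))).length)) '.' ++
      seg ++ p.filter (fun c => !(c == '.')) ++ pvTail ps := by
  induction cs with
  | nil =>
    intro res seg dots p ps h
    simp [pvSplit1] at h
    obtain ⟨h1, h2⟩ := h
    subst h1; subst h2
    simp [pvTail]
  | cons c t ih =>
    intro res seg dots p ps h
    rcases hX : pvSplit1 t with _ | ⟨q, qs⟩
    · exact absurd hX (pvSplit1_ne_nil t)
    rw [List.foldl_cons]
    by_cases hc : c = '#'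
    · subst hc
      rw [pvSplit1, if_pos rfl, hX] at h
      injection h with h1 h2
      subst h1; subst h2
      have := ih (res ++ List.replicate dots '.' ++ seg ++ ['#']) [] 0 q qs hX
      rw [show pvFallStep (res, seg, dots) '#' =
          (res ++ List.replicate dots '.' ++ seg ++ ['#'], [], 0) from rfl]
      rw [this]
      simp [pvTail, pvG, List.append_assoc]
    · rw [pvSplit1, if_neg hc, hX] at h
      injection h with h1 h2
      subst h1; subst h2
      by_cases hd : c = '.'
      · subst hd
        rw [show pvFallStep (res, seg, dots) '.' = (res, seg, dots + 1) from rfl]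
        rw [ih res seg (dots + 1) q qs hX]
        have hk := List.length_filter_le (fun c => !(c == '.')) q
        have : dots + 1 + (q.length - (q.filter (fun c => !(c == '.'))).length) =
            dots + (('.' :: q).length - (('.' :: q).filter (fun c => !(c == '.'))).length) := by
          simp
          omega
        rw [this]
        simp
      · rw [show pvFallStep (res, seg, dots) c = (res, seg ++ [c], dots) by
          simp [pvFallStep, hc, hd]]
        rw [ih res (seg ++ [c]) dots q qs hX]
        simp [hd, List.append_assoc]

-- the core per-column theorem: B's single scan equals A's split/compress/join pipeline
theorem pvFall_eq_pipe (cs : List Char) : pvFall cs = pvApipe cs := by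
  rcases hX : pvSplit1 cs with _ | ⟨p, ps⟩
  · exact absurd hX (pvSplit1_ne_nil cs)
  rw [pvApipe_spec cs p ps hX]
  show (cs.foldl pvFallStep ([], [], 0)).1 ++
      List.replicate (cs.foldl pvFallStep ([], [], 0)).2.2 '.' ++
      (cs.foldl pvFallStep ([], [], 0)).2.1 = pvG p ++ pvTail ps
  rw [pvFall_inv cs [] [] 0 p ps hX]
  simp [pvG, List.append_assoc]

-- reading a list through `range length / getD` is the list itself
theorem pvRangeGetD {α : Type} (l : List α) (d : α) :
    (List.range l.length).map (fun r => l.getD r d) = l := by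
  apply List.ext_getElem (by simp)
  intro i h1 h2
  simp [List.getD_eq_getElem?_getD, List.getElem?_eq_getElem h2]

-- B's column read (a fold appending each row's cell) equals A's join-over-range read
theorem pvText_eq (g : List (List String)) (c : Nat) :
    g.foldl (fun acc row => acc ++ (row.getD c "").toList) [] = pvColText g c := by
  rw [PySem.List.foldl_append_eq_flatMap]
  unfold pvColText
  have h : (List.range g.length).map (fun r => ((g.getD r []).getD c "").toList) =
      g.map (fun row => (row.getD c "").toList) := by
    conv_rhs => rw [← pvRangeGetD g []]
    rw [List.map_map]
    rfl
  rw [h]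
  have hjoin : ∀ parts : List (List Char), PySem.Chars.join [] parts = parts.flatten := by
    intro parts
    induction parts with
    | nil => simp [PySem.Chars.join, List.intercalate]
    | cons p ps ihp =>
      cases ps with
      | nil => simp [PySem.Chars.join_singleton]
      | cons q qs => rw [PySem.Chars.join_cons_cons]; simp_all
  rw [hjoin, List.flatMap_def]
  simp

-- a fold of `modify r (h r)` over all row indices is a mapIdx
theorem pvFoldModifyAux {α : Type} (g : List α) (h : Nat → α → α) (n : Nat) :
    (List.range n).foldl (fun g2 r => g2.modify r (h r)) g =
      g.mapIdx (fun i a => if i < n then h i a else a) := by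
  induction n with
  | zero =>
    apply List.ext_getElem (by simp)
    intro i h1 h2
    simp
  | succ n ih =>
    rw [List.range_succ, List.foldl_append, List.foldl_cons, List.foldl_nil, ih]
    apply List.ext_getElem (by simp)
    intro i h1 h2
    rcases Nat.lt_or_ge i n with hin | hin
    · rw [List.getElem_modify]
      simp [List.getElem_mapIdx]
      split_ifs <;> simp_all <;> omega
    · rw [List.getElem_modify]
      simp [List.getElem_mapIdx]
      split_ifs <;> simp_all <;> omega

theorem pvFoldModifyAll {α : Type} (g : List α) (h : Nat → α → α) :
    (List.range g.length).foldl (fun g2 r => g2.modify r (h r)) g = g.mapIdx h := by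
  rw [pvFoldModifyAux]
  apply List.ext_getElem (by simp)
  intro i h1 h2
  simp at h1
  simp [List.getElem_mapIdx, h1]

-- a fold of whole-grid mapIdx steps is one mapIdx of per-row folds
theorem pvFoldMapIdx {α : Type} (l : List Nat) (t : Nat → Nat → α → α) (g : List α) :
    l.foldl (fun g2 c => g2.mapIdx (fun r row => t c r row)) g =
      g.mapIdx (fun r row => l.foldl (fun row2 c => t c r row2) row) := by
  induction l generalizing g with
  | nil =>
    simp only [List.foldl_nil]
    apply List.ext_getElem (by simp)
    intro i h1 h2
    simp [List.getElem_mapIdx]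
  | cons c l ih =>
    simp only [List.foldl_cons]
    rw [ih]
    apply List.ext_getElem (by simp)
    intro i h1 h2
    simp [List.getElem_mapIdx]

-- writing column c' leaves every cell of column c ≠ c' (and all row lengths) unchanged
theorem pvCell_write {g : List (List String)} {c c' : Nat} (hne : c' ≠ c) (v : Nat → String)
    (r : Nat) :
    (((g.mapIdx (fun r0 row => row.set c' (v r0))).getD r []).getD c "") =
      ((g.getD r []).getD c "") := by
  rcases hr : g[r]? with _ | row
  · simp [List.getD, List.getElem?_mapIdx, hr]
  · simp only [List.getD, List.getElem?_mapIdx, hr, Option.map_some, Option.getD_some]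
    rw [List.getElem?_set_ne hne]

-- A's outer fold, with each column's pipeline value frozen to the ORIGINAL grid: stepA only
-- writes the column it processes, so later columns still read their original cells
theorem pvAfold (stones : List (List String)) (l : List Nat) :
    ∀ (g : List (List String)), l.Nodup → g.length = stones.length →
      (∀ c ∈ l, ∀ r : Nat, ((g.getD r []).getD c "") = ((stones.getD r []).getD c "")) →
      l.foldl pvStepA g =
        l.foldl (fun g2 c => g2.mapIdx (fun r row =>
          row.set c (String.ofList [(pvApipe (pvColText stones c)).getD r ' ']))) g := by
  induction l with
  | nil => intro g _ _ _; rfl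
  | cons c l ih =>
    intro g hnd hlen hcells
    simp only [List.foldl_cons]
    have hcol : pvColText g c = pvColText stones c := by
      unfold pvColText
      rw [hlen]
      congr 1
      apply List.map_congr_left
      intro r _
      rw [hcells c (by simp) r]
    have hstep : pvStepA g c =
        g.mapIdx (fun r row => row.set c (String.ofList [(pvApipe (pvColText stones c)).getD r ' '])) := by
      show (List.range g.length).foldl (fun g2 r =>
        g2.modify r (fun row => row.set c (String.ofList [(pvApipe (pvColText g c)).getD r ' ']))) g = _
      rw [hcol, pvFoldModifyAll]
    rw [hstep]
    have hnd' : l.Nodup := (List.nodup_cons.mp hnd).2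
    have hc_notmem : c ∉ l := (List.nodup_cons.mp hnd).1
    exact ih _ hnd' (by simp [hlen])
      (fun c' hc' r => by
        have hne : c ≠ c' := fun h => hc_notmem (h ▸ hc')
        rw [pvCell_write hne _ r]
        exact hcells c' (by simp [hc']) r)

-- ===== VERDICT (by name: the statement is the Claim_ definition above) =====
theorem shift_to_south_spec : Claim_equal_shift_to_south := by
  intro stones _hdom _hpre
  unfold Spec_shift_to_south
  set W := ((PySem.List.pyGet? stones 0).getD []).length with hW
  -- A's side
  have hA : shift_to_south stones = stones.mapIdx (fun r row =>
      (List.range W).foldl (fun row2 c =>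
        row2.set c (String.ofList [(pvApipe (pvColText stones c)).getD r ' '])) row) := by
    show (List.range W).foldl pvStepA stones = _
    rw [pvAfold stones (List.range W) stones (List.nodup_range) rfl (fun _ _ _ => rfl)]
    exact pvFoldMapIdx (List.range W)
      (fun c r row => row.set c (String.ofList [(pvApipe (pvColText stones c)).getD r ' '])) stones
  -- B's side
  have hB : shift_to_south_alt stones = stones.mapIdx (fun r row =>
      (List.range W).foldl (fun row2 c =>
        row2.set c (String.ofList [(pvApipe (pvColText stones c)).getD r ' '])) row) := by
    show (List.range stones.length).foldl (fun g r =>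
      g.modify r (fun row =>
        (List.range ((List.range W).map (fun c =>
            pvFall (stones.foldl (fun acc row => acc ++ (row.getD c "").toList) []))).length).foldl
          (fun row2 c =>
            row2.set c (String.ofList [(((List.range W).map (fun c =>
              pvFall (stones.foldl (fun acc row => acc ++ (row.getD c "").toList) []))).getD c []).getD r ' '])) row)) stones = _
    rw [pvFoldModifyAll]
    congr 1
    funext r row
    rw [List.length_map, List.length_range]
    apply PySem.List.foldl_congr_mem
    intro row2 c hc
    have hcW : c < W := List.mem_range.mp hc
    have hget : ((List.range W).map (fun c =>
        pvFall (stones.foldl (fun acc row => acc ++ (row.getD c "").toList) []))).getD c [] =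
        pvFall (stones.foldl (fun acc row => acc ++ (row.getD c "").toList) []) := by
      simp [List.getD, List.getElem?_map, List.getElem?_range hcW]
    rw [hget, pvText_eq, pvFall_eq_pipe]
  rw [hA, hB]
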